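-- pv_equiv track=rewrite | github.com/toomas-tigasing/J-ULUPROJEKT | clickergame/settings.py | handle_color_selection
-- ===== SOURCE A (Python) =====
-- def handle_color_selection(x, y, colors_list):
--     """Check if a color was clicked and return the selected color or None"""
--     y_pos = 180
--     for color in colors_list:
--         if 200 <= x <= 230 and y_pos <= y <= y_pos + 30:
--             return color
--         y_pos += 35
--
--     # Check custom color button (adjusted position for 8 colors instead of 7)
--     if 200 <= x <= 230 and 455 <= y <= 485:
--         return "custom"
--
--     return None
-- ===== SOURCE B (Python) =====
-- def handle_color_selection(x, y, colors_list):
--     """Check if a color was clicked and return the selected color or None"""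
--     if not (200 <= x <= 230):
--         return None
--     i = (y - 180) // 35
--     offset = y - (180 + 35 * i)
--     if 0 <= i < len(colors_list) and offset <= 30:
--         return colors_list[i]
--     if 455 <= y <= 485:
--         return "custom"
--     return None
-- ===== Notes on version B (the rewrite author's own statement) =====
-- stated objective: faster
-- what changed: Replaces the linear scan over color rows starting at y=180 with a direct index computation i = (y-180)//35 plus a residual-in-[0,30] check, indexing colors_list once.
import Mathlib
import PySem

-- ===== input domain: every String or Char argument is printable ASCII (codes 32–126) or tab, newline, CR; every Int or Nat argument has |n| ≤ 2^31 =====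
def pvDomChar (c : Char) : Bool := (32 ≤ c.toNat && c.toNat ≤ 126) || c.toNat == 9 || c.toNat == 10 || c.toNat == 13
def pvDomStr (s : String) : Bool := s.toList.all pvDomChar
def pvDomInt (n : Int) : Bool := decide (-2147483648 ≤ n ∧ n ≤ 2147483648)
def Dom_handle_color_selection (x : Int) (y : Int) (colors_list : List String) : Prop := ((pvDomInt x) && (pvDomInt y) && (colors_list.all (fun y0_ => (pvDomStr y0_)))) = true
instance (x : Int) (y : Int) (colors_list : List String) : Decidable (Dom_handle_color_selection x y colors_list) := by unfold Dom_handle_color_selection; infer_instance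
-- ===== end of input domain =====

-- B replaces A's linear scan over 35-pixel color rows by a direct index computation
-- i = (y-180)//35 with a residual-in-[0,30] check (objective: faster, constant-factor O(1) vs O(n) scan).

-- ===== PORT A =====
-- the 'for color in colors_list' loop of A, carrying the mutable y_pos
def pvALoop (x y y_pos : Int) (cs : List String) : Option String :=
  match cs with
  | [] => none
  | c :: rest =>
      if 200 ≤ x ∧ x ≤ 230 ∧ y_pos ≤ y ∧ y ≤ y_pos + 30 then some c
      else pvALoop x y (y_pos + 35) rest

def handle_color_selection (x : Int) (y : Int) (colors_list : List String) : Option String :=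
  match pvALoop x y 180 colors_list with
  | some c => some c
  | none =>
      if 200 ≤ x ∧ x ≤ 230 ∧ 455 ≤ y ∧ y ≤ 485 then some "custom" else none

-- ===== PORT B =====
def handle_color_selection_alt (x : Int) (y : Int) (colors_list : List String) : Option String :=
  if ¬ (200 ≤ x ∧ x ≤ 230) then none
  else
    let i := PySem.Int.floordiv (y - 180) 35
    let offset := y - (180 + 35 * i)
    if 0 ≤ i ∧ i < (colors_list.length : Int) ∧ offset ≤ 30 then
      PySem.List.pyGet? colors_list i
    else if 455 ≤ y ∧ y ≤ 485 then some "custom"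
    else none

-- ===== PRECONDITION & SPEC =====
def Spec_handle_color_selection (x : Int) (y : Int) (colors_list : List String) (out : Option String) : Prop := out = handle_color_selection_alt x y colors_list
instance (x : Int) (y : Int) (colors_list : List String) (out : Option String) : Decidable (Spec_handle_color_selection x y colors_list out) := by unfold Spec_handle_color_selection; infer_instance

-- ===== CLAIM (what is proved, stated in full; the proofs are below) =====
def Claim_equal_handle_color_selection : Prop := ∀ (x : Int) (y : Int) (colors_list : List String), Dom_handle_color_selection x y colors_list → Spec_handle_color_selection x y colors_list (handle_color_selection x y colors_list)

-- ===== LEMMAS AND PROOFS =====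

-- characterisation of A's loop: starting at row k, it hits exactly row i = (y-180)//35
-- (when k ≤ i, i is inside the remaining list, and the residual is ≤ 30)
theorem pvALoop_char (x y : Int) (cs : List String) (k : Nat)
    (hx : 200 ≤ x ∧ x ≤ 230) :
    pvALoop x y (180 + 35 * (k : Int)) cs =
      (if 0 ≤ PySem.Int.floordiv (y - 180) 35 - (k : Int) ∧
          PySem.Int.floordiv (y - 180) 35 - (k : Int) < (cs.length : Int) ∧
          y - (180 + 35 * PySem.Int.floordiv (y - 180) 35) ≤ 30 then
        cs[(PySem.Int.floordiv (y - 180) 35 - (k : Int)).toNat]?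
      else none) := by
  have hfd : PySem.Int.floordiv (y - 180) 35 = (y - 180) / 35 :=
    PySem.Int.floordiv_eq_ediv_of_pos (by omega)
  have hdm : 35 * ((y - 180) / 35) + (y - 180) % 35 = y - 180 := Int.mul_ediv_add_emod _ _
  have hm0 : 0 ≤ (y - 180) % 35 := Int.emod_nonneg _ (by omega)
  have hm1 : (y - 180) % 35 < 35 := Int.emod_lt_of_pos _ (by omega)
  induction cs generalizing k with
  | nil => simp only [pvALoop]; rw [if_neg]; rintro ⟨h1, h2, _⟩; simp at h2; omega
  | cons c rest ih =>
    simp only [pvALoop]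
    by_cases hhit : 180 + 35 * (k : Int) ≤ y ∧ y ≤ 180 + 35 * (k : Int) + 30
    · have hik : (y - 180) / 35 = (k : Int) := by omega
      rw [if_pos ⟨hx.1, hx.2, hhit.1, by omega⟩, if_pos]
      · rw [hfd, hik]; simp
      · rw [hfd, hik]
        refine ⟨by omega, ?_, by omega⟩
        simp only [List.length_cons]; push_cast; omega
    · rw [if_neg (by tauto)]
      have hstep : 180 + 35 * (k : Int) + 35 = 180 + 35 * ((k + 1 : Nat) : Int) := by
        push_cast; omega
      rw [hstep, ih (k + 1)]
      by_cases hik : (y - 180) / 35 = (k : Int)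
      · -- the click missed row k vertically, so the residual is > 30 and both sides are none
        rw [if_neg, if_neg]
        · rw [hfd, hik]; rintro ⟨_, _, h3⟩; omega
        · rw [hfd, hik]; push_cast; rintro ⟨h1, _, _⟩; omega
      · have hcond : (0 ≤ PySem.Int.floordiv (y - 180) 35 - ((k + 1 : Nat) : Int) ∧
            PySem.Int.floordiv (y - 180) 35 - ((k + 1 : Nat) : Int) < (rest.length : Int) ∧
            y - (180 + 35 * PySem.Int.floordiv (y - 180) 35) ≤ 30) ↔
            (0 ≤ PySem.Int.floordiv (y - 180) 35 - (k : Int) ∧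
            PySem.Int.floordiv (y - 180) 35 - (k : Int) < ((c :: rest).length : Int) ∧
            y - (180 + 35 * PySem.Int.floordiv (y - 180) 35) ≤ 30) := by
          rw [hfd]
          simp only [List.length_cons]
          push_cast
          constructor <;> rintro ⟨ha, hb, hc⟩ <;> exact ⟨by omega, by omega, hc⟩
        by_cases h1 : 0 ≤ PySem.Int.floordiv (y - 180) 35 - ((k + 1 : Nat) : Int) ∧
            PySem.Int.floordiv (y - 180) 35 - ((k + 1 : Nat) : Int) < (rest.length : Int) ∧
            y - (180 + 35 * PySem.Int.floordiv (y - 180) 35) ≤ 30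
        · rw [if_pos h1, if_pos (hcond.mp h1)]
          have heq : ((PySem.Int.floordiv (y - 180) 35 - (k : Int)).toNat) =
              ((PySem.Int.floordiv (y - 180) 35 - ((k + 1 : Nat) : Int)).toNat) + 1 := by
            rw [hfd] at h1 ⊢; push_cast at h1 ⊢; omega
          rw [heq, List.getElem?_cons_succ]
        · rw [if_neg h1, if_neg (fun h => h1 (hcond.mpr h))]

theorem pvALoop_none (x y y_pos : Int) (cs : List String) (hx : ¬ (200 ≤ x ∧ x ≤ 230)) :
    pvALoop x y y_pos cs = none := by
  induction cs generalizing y_pos with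
  | nil => rfl
  | cons c rest ih => simp only [pvALoop]; rw [if_neg (by tauto)]; exact ih _

-- ===== VERDICT (by name: the statement is the Claim_ definition above) =====
theorem handle_color_selection_spec : Claim_equal_handle_color_selection := by
  intro x y cs _
  unfold Spec_handle_color_selection handle_color_selection handle_color_selection_alt
  by_cases hx : 200 ≤ x ∧ x ≤ 230
  · have h := pvALoop_char x y cs 0 hx
    simp only [Nat.cast_zero, mul_zero, add_zero, sub_zero] at h
    rw [h, if_neg (not_not_intro hx)]
    by_cases h1 : 0 ≤ PySem.Int.floordiv (y - 180) 35 ∧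
        PySem.Int.floordiv (y - 180) 35 < (cs.length : Int) ∧
        y - (180 + 35 * PySem.Int.floordiv (y - 180) 35) ≤ 30
    · rw [if_pos h1, if_pos h1, PySem.List.pyGet?_of_nonneg cs h1.1]
      obtain ⟨v, hv⟩ : ∃ v, cs[(PySem.Int.floordiv (y - 180) 35).toNat]? = some v := by
        refine ⟨cs[(PySem.Int.floordiv (y - 180) 35).toNat], List.getElem?_eq_getElem ?_⟩
        have ha := h1.1; have hb := h1.2.1; omega
      rw [hv]
    · rw [if_neg h1, if_neg h1]
      by_cases h2 : 455 ≤ y ∧ y ≤ 485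
      · rw [if_pos ⟨hx.1, hx.2, h2.1, h2.2⟩, if_pos h2]
      · rw [if_neg (by tauto), if_neg h2]
  · rw [if_pos hx, pvALoop_none x y 180 cs hx, if_neg (by tauto)]
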